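-- pv_equiv track=rewrite | github.com/mariannlepsoy/Kattis-solutions | src/aseasyascab.py | create_graph_outedges
-- ===== SOURCE A (Python) =====
-- def create_graph_outedges(all_lines, n, characters, prefix):
--     outedges = {char: [] for char in characters}
--     inedges = {char: [] for char in characters}
--     for i in range(int(n)-1):
--         word1 = all_lines[i]
--         word2 = all_lines[i+1]
--
--         #Checks if word1 is a prefix of word2, if so it should be impossible.
--         if len(word1) > len(word2) and word1[:len(word2)] == word2:
--             prefix[0] = True
--             break
--
--         #Compare two and two characters until one differing one can be found.
--         for j in range(min(len(word1), len(word2))):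
--             if word1[j] != word2[j]:
--                 outedges[word1[j]].append(word2[j])
--                 inedges[word2[j]].append(word1[j])
--                 break
--     return outedges, inedges
-- ===== SOURCE B (Python) =====
-- def create_graph_outedges(all_lines, n, characters, prefix):
--     # Staged pipeline instead of dict mutation inside the scan:
--     # 1) classify every consecutive pair (first-diff edge / prefix violation / nothing),
--     # 2) truncate the stream at the first violation (setting the flag),
--     # 3) bucket the surviving edge stream once, then read the buckets per character.
--     results = []
--     for i in range(int(n) - 1):
--         w1, w2 = all_lines[i], all_lines[i + 1]
--         k = 0
--         while k < len(w1) and k < len(w2) and w1[k] == w2[k]: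
--             k += 1
--         if k < len(w1) and k < len(w2):
--             results.append((w1[k], w2[k]))
--         elif len(w1) > len(w2):
--             results.append(None)
--     edges = []
--     for r in results:
--         if r is None:
--             prefix[0] = True
--             break
--         edges.append(r)
--     buckets_out, buckets_in = {}, {}
--     for a, b in edges:
--         buckets_out.setdefault(a, []).append(b)
--         buckets_in.setdefault(b, []).append(a)
--     outedges = {c: buckets_out.get(c, []) for c in characters}
--     inedges = {c: buckets_in.get(c, []) for c in characters}
--     return outedges, inedges
-- ===== Notes on version B (the rewrite author's own statement) =====
-- stated objective: alternative
-- what changed: A builds both dicts by mutating them inside a nested scan with an up-front slice-comparison prefix guard and an early outer break; B is a staged pipeline: it classifies every consecutive pair (first differing character pair / prefix-violation marker / nothing) via a common-prefix-length scan, truncates that stream at the first violation marker (setting the flag), buckets the surviving edge stream once with setdefault, and only then assembles the result dicts per character.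
-- outside the precondition, e.g. on create_graph_outedges(['aa', 'a'], 3, [], [False]): A returns ({}, {}), B raises IndexError
import Mathlib
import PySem

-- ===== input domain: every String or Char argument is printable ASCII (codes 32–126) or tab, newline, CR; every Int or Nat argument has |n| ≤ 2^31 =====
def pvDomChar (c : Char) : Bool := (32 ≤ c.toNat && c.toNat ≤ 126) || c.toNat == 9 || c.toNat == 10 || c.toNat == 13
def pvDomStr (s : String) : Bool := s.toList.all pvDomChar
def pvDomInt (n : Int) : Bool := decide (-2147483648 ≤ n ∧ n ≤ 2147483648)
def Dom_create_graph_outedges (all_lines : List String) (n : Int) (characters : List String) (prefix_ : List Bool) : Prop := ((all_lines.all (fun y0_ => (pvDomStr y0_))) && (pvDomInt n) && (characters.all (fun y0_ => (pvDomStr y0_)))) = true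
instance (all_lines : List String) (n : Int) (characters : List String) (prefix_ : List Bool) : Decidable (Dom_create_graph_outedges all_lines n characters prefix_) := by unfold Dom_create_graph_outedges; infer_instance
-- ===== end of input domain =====

-- B replaces A's in-scan dict mutation by a staged pipeline (classify each pair →
-- truncate at the first prefix violation → group the edge stream per character);
-- objective: alternative. Both A and B mutate prefix_[0] identically (side effect);
-- the equivalence proved here is about the RETURN value only.

-- ===== PORT A =====

-- Python's word[j] is a 1-character str; this is that value as a dict key / edge label.
def pvCharStr (c : Char) : String := String.ofList [c]

-- the inner loop of A: `for j in range(min(len(word1), len(word2))): …` with break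
def pvA_inner (w1 w2 : String) (js : List Int)
    (st : PySem.Dict String (List String) × PySem.Dict String (List String)) :
    PySem.Dict String (List String) × PySem.Dict String (List String) :=
  match js with
  | [] => st
  | j :: rest =>
    match PySem.Str.pyGet? w1 j, PySem.Str.pyGet? w2 j with
    | some c1, some c2 =>
      if c1 ≠ c2 then
        (st.1.modify (pvCharStr c1) [] (fun l => l ++ [pvCharStr c2]),
         st.2.modify (pvCharStr c2) [] (fun l => l ++ [pvCharStr c1]))
      else pvA_inner w1 w2 rest st
    | _, _ => st   -- IndexError (unreachable: j < min of the lengths); excluded by Pre_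

-- the outer loop of A: `for i in range(int(n)-1): …` with break on the prefix guard
def pvA_loop (all_lines : List String) (is : List Int)
    (st : PySem.Dict String (List String) × PySem.Dict String (List String)) :
    PySem.Dict String (List String) × PySem.Dict String (List String) :=
  match is with
  | [] => st
  | i :: rest =>
    match PySem.List.pyGet? all_lines i, PySem.List.pyGet? all_lines (i + 1) with
    | some w1, some w2 =>
      if PySem.Str.len w1 > PySem.Str.len w2 ∧
          PySem.Str.slice w1 none (some (PySem.Str.len w2)) = w2 then
        st  -- prefix[0] = True; break
      else
        pvA_loop all_lines rest
          (pvA_inner w1 w2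
            (PySem.List.pyRange 0 (min (PySem.Str.len w1) (PySem.Str.len w2))) st)
    | _, _ => st   -- IndexError; excluded by Pre_

def create_graph_outedges (all_lines : List String) (n : Int) (characters : List String) (prefix_ : List Bool) : (List (String × List String)) × (List (String × List String)) :=
  let outedges := characters.foldl (fun d ch => d.insert ch ([] : List String)) PySem.Dict.empty
  let inedges := characters.foldl (fun d ch => d.insert ch ([] : List String)) PySem.Dict.empty
  let r := pvA_loop all_lines (PySem.List.pyRange 0 (n - 1)) (outedges, inedges)
  (r.1.items, r.2.items)

-- ===== PORT B =====

-- `while k < len(w1) and k < len(w2) and w1[k] == w2[k]: k += 1` — the common prefix length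
def pvCpl : List Char → List Char → Nat
  | a :: s, b :: t => if a = b then pvCpl s t + 1 else 0
  | _, _ => 0

-- stage-1 classification of one pair: some (some (a, b)) = first differing characters,
-- some none = prefix-violation marker, none = nothing appended
def pvB_classify (w1 w2 : String) : Option (Option (Char × Char)) :=
  let k := pvCpl w1.toList w2.toList
  match w1.toList[k]?, w2.toList[k]? with
  | some a, some b => some (some (a, b))
  | _, _ => if w1.toList.length > w2.toList.length then some none else none

-- stage 1: `results` over all pairs (no break)
def pvB_results (all_lines : List String) : List Int → List (Option (Char × Char))
  | [] => []
  | i :: rest =>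
    match PySem.List.pyGet? all_lines i, PySem.List.pyGet? all_lines (i + 1) with
    | some w1, some w2 =>
      match pvB_classify w1 w2 with
      | some r => r :: pvB_results all_lines rest
      | none => pvB_results all_lines rest
    | _, _ => []   -- IndexError; excluded by Pre_

-- stage 2: truncate at the first violation marker (which sets prefix_[0])
def pvB_trunc : List (Option (Char × Char)) → List (Char × Char)
  | [] => []
  | none :: _ => []
  | some e :: rs => e :: pvB_trunc rs

def create_graph_outedges_alt (all_lines : List String) (n : Int) (characters : List String) (prefix_ : List Bool) : (List (String × List String)) × (List (String × List String)) :=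
  let results := pvB_results all_lines (PySem.List.pyRange 0 (n - 1))
  let edges := pvB_trunc results
  -- stage 3: `buckets_out.setdefault(a, []).append(b)` is d[a] = d.get(a, []) + [b], i.e. modify
  let buckets_out := edges.foldl (fun d e =>
    d.modify (pvCharStr e.1) [] (fun l => l ++ [pvCharStr e.2])) PySem.Dict.empty
  let buckets_in := edges.foldl (fun d e =>
    d.modify (pvCharStr e.2) [] (fun l => l ++ [pvCharStr e.1])) PySem.Dict.empty
  let outedges := characters.foldl (fun d c => d.insert c (buckets_out.getD c [])) PySem.Dict.empty
  let inedges := characters.foldl (fun d c => d.insert c (buckets_in.getD c [])) PySem.Dict.empty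
  (outedges.items, inedges.items)

-- ===== PRECONDITION & SPEC =====
-- Pre_ excludes exactly the inputs where the Python raises: an IndexError when n exceeds
-- len(all_lines) (with n ≥ 2 so the loop runs), and a KeyError when a character of one of the
-- first n words is not listed in `characters`. (It is stated word-wise, so it also excludes
-- some inputs where A happens to return — e.g. an early prefix break before the bad index,
-- or a missing character that is never the first difference of a pair; see the cites.)
def Pre_create_graph_outedges (all_lines : List String) (n : Int) (characters : List String) (prefix_ : List Bool) : Prop :=
  (n ≤ (all_lines.length : Int) ∨ n ≤ 1) ∧
  ∀ s ∈ all_lines.take n.toNat, ∀ c ∈ s.toList, pvCharStr c ∈ characters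
instance (all_lines : List String) (n : Int) (characters : List String) (prefix_ : List Bool) : Decidable (Pre_create_graph_outedges all_lines n characters prefix_) := by unfold Pre_create_graph_outedges; infer_instance

def pvWitness_create_graph_outedges : List String × Int × List String × List Bool :=
  ([], 0, [], [])

def Spec_create_graph_outedges (all_lines : List String) (n : Int) (characters : List String) (prefix_ : List Bool) (out : (List (String × List String)) × (List (String × List String))) : Prop := out = create_graph_outedges_alt all_lines n characters prefix_
instance (all_lines : List String) (n : Int) (characters : List String) (prefix_ : List Bool) (out : (List (String × List String)) × (List (String × List String))) : Decidable (Spec_create_graph_outedges all_lines n characters prefix_ out) := by unfold Spec_create_graph_outedges; infer_instance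

-- ===== CLAIM (what is proved, stated in full; the proofs are below) =====
def Claim_equal_create_graph_outedges : Prop := ∀ (all_lines : List String) (n : Int) (characters : List String) (prefix_ : List Bool), Dom_create_graph_outedges all_lines n characters prefix_ → Pre_create_graph_outedges all_lines n characters prefix_ → Spec_create_graph_outedges all_lines n characters prefix_ (create_graph_outedges all_lines n characters prefix_)

-- ===== LEMMAS AND PROOFS =====

-- the first differing character pair of two zipped words (proof-side characterisation)
def pvFirstDiff (ps : List (Char × Char)) : Option (Char × Char) :=
  match ps with
  | [] => none
  | (a, b) :: rest => if a ≠ b then some (a, b) else pvFirstDiff rest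

-- the edge stream A actually applies: first-diff per pair, cut at the first prefix violation
def pvEdgesA (all_lines : List String) : List Int → List (Char × Char)
  | [] => []
  | i :: rest =>
    match PySem.List.pyGet? all_lines i, PySem.List.pyGet? all_lines (i + 1) with
    | some w1, some w2 =>
      match pvFirstDiff (List.zip w1.toList w2.toList) with
      | some e => e :: pvEdgesA all_lines rest
      | none =>
        if PySem.Str.len w1 > PySem.Str.len w2 then [] else pvEdgesA all_lines rest
    | _, _ => []

theorem pvFirstDiff_none_iff :
    ∀ (s t : List Char), t.length ≤ s.length →
      (pvFirstDiff (List.zip s t) = none ↔ s.take t.length = t) := by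
  intro s
  induction s with
  | nil =>
    intro t ht
    have : t = [] := List.length_eq_zero_iff.mp (Nat.le_zero.mp ht)
    subst this; simp [pvFirstDiff]
  | cons a s ih =>
    intro t ht
    cases t with
    | nil => simp [pvFirstDiff]
    | cons b t =>
      simp only [List.zip_cons_cons, pvFirstDiff, List.length_cons, List.take_succ_cons]
      by_cases hab : a = b
      · subst hab
        simp only [ne_eq, not_true_eq_false, List.cons.injEq, true_and, if_false]
        simpa using ih t (by simpa using ht)
      · simp [hab]

theorem pvFirstDiff_eq_cpl :
    ∀ (s t : List Char),
      pvFirstDiff (List.zip s t)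
        = match s[pvCpl s t]?, t[pvCpl s t]? with
          | some a, some b => some (a, b)
          | _, _ => none := by
  intro s
  induction s with
  | nil => intro t; simp [pvFirstDiff, pvCpl]
  | cons a s ih =>
    intro t
    cases t with
    | nil => simp [pvFirstDiff, pvCpl]
    | cons b t =>
      by_cases hab : a = b
      · subst hab
        simp only [List.zip_cons_cons, pvFirstDiff, ne_eq, not_true_eq_false, if_false, pvCpl]
        simpa using ih t
      · simp [pvFirstDiff, pvCpl, hab]

theorem pvB_classify_eq (w1 w2 : String) :
    pvB_classify w1 w2
      = match pvFirstDiff (List.zip w1.toList w2.toList) with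
        | some e => some (some e)
        | none =>
          if w1.toList.length > w2.toList.length then some none else none := by
  rw [pvFirstDiff_eq_cpl]
  unfold pvB_classify
  cases h1 : w1.toList[pvCpl w1.toList w2.toList]? with
  | none => cases h2 : w2.toList[pvCpl w1.toList w2.toList]? <;> simp [h1, h2]
  | some a => cases h2 : w2.toList[pvCpl w1.toList w2.toList]? <;> simp [h1, h2]

theorem pvB_trunc_results_eq (all_lines : List String) :
    ∀ is : List Int, pvB_trunc (pvB_results all_lines is) = pvEdgesA all_lines is := by
  intro is
  induction is with
  | nil => rfl
  | cons i rest ih =>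
    simp only [pvB_results, pvEdgesA]
    cases PySem.List.pyGet? all_lines i with
    | none => rfl
    | some w1 =>
      cases PySem.List.pyGet? all_lines (i + 1) with
      | none => rfl
      | some w2 =>
        dsimp only
        rw [pvB_classify_eq]
        cases hfd : pvFirstDiff (List.zip w1.toList w2.toList) with
        | some e => simp [pvB_trunc, ih]
        | none =>
          by_cases hl : w1.toList.length > w2.toList.length
          · rw [if_pos (by simpa using hl), if_pos (by simp [pysem]; simpa using hl)]
            rfl
          · rw [if_neg (by simpa using hl), if_neg (by simp [pysem]; simpa using hl)]
            exact ih

theorem pvA_inner_zip :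
    ∀ (s t p1 p2 : List Char)
      (st : PySem.Dict String (List String) × PySem.Dict String (List String)),
      p1.length = p2.length →
      pvA_inner (String.ofList (p1 ++ s)) (String.ofList (p2 ++ t))
          (PySem.List.pyRange (p1.length : Int)
            ((p1.length : Int) + ((min s.length t.length : Nat) : Int))) st
        = match pvFirstDiff (List.zip s t) with
          | some (a, b) =>
            (st.1.modify (pvCharStr a) [] (fun l => l ++ [pvCharStr b]),
             st.2.modify (pvCharStr b) [] (fun l => l ++ [pvCharStr a]))
          | none => st := by
  intro s
  induction s with
  | nil =>
    intro t p1 p2 st h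
    simp [pvA_inner, pvFirstDiff, pysem]
  | cons a s ih =>
    intro t p1 p2 st h
    cases t with
    | nil =>
      simp [pvA_inner, pvFirstDiff, pysem]
    | cons b t =>
      have hmin : min (a :: s).length (b :: t).length = min s.length t.length + 1 := by
        simp [Nat.succ_min_succ]
      rw [hmin]
      rw [PySem.List.pyRange_one_cons (by push_cast; omega)]
      have hg1 : PySem.Str.pyGet? (String.ofList (p1 ++ a :: s)) (p1.length : Int) = some a := by
        simp
      have hg2 : PySem.Str.pyGet? (String.ofList (p2 ++ b :: t)) (p1.length : Int) = some b := by
        rw [h]; simp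
      simp only [pvA_inner, hg1, hg2, List.zip_cons_cons, pvFirstDiff]
      by_cases hab : a = b
      · subst hab
        simp only [ne_eq, not_true_eq_false, if_false]
        have harr : (p1.length : Int) + 1 = ((p1 ++ [a]).length : Int) := by
          simp
        have harr2 : (p1.length : Int) + ((min s.length t.length + 1 : Nat) : Int)
            = ((p1 ++ [a]).length : Int) + ((min s.length t.length : Nat) : Int) := by
          simp; ring
        rw [harr, harr2, show p1 ++ a :: s = (p1 ++ [a]) ++ s by simp,
            show p2 ++ a :: t = (p2 ++ [a]) ++ t by simp]
        exact ih t (p1 ++ [a]) (p2 ++ [a]) st (by simp [h])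
      · simp [hab]

theorem pv_guard_iff (w1 w2 : String) (hl : w2.toList.length < w1.toList.length) :
    PySem.Str.slice w1 none (some (PySem.Str.len w2)) = w2
      ↔ pvFirstDiff (List.zip w1.toList w2.toList) = none := by
  rw [pvFirstDiff_none_iff _ _ (Nat.le_of_lt hl)]
  constructor
  · intro h
    have := congrArg String.toList h
    simpa [pysem] using this
  · intro h
    apply String.toList_inj.mp
    simpa [pysem] using h

theorem pv_inner_eq (w1 w2 : String)
    (st : PySem.Dict String (List String) × PySem.Dict String (List String)) :
    pvA_inner w1 w2
        (PySem.List.pyRange 0 (min (PySem.Str.len w1) (PySem.Str.len w2))) st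
      = match pvFirstDiff (List.zip w1.toList w2.toList) with
        | some (a, b) =>
          (st.1.modify (pvCharStr a) [] (fun l => l ++ [pvCharStr b]),
           st.2.modify (pvCharStr b) [] (fun l => l ++ [pvCharStr a]))
        | none => st := by
  have h := pvA_inner_zip w1.toList w2.toList [] [] st rfl
  rw [show min (PySem.Str.len w1) (PySem.Str.len w2)
        = ((min w1.toList.length w2.toList.length : Nat) : Int) by
      simp [PySem.Str.len_eq, Nat.cast_min]]
  simpa only [List.nil_append, List.length_nil, Nat.cast_zero, zero_add,
    String.ofList_toList] using h

-- A's loop applies exactly the edge stream pvEdgesA, one modify per side and edge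
theorem pvA_loop_eq_edges (all_lines : List String) :
    ∀ (is : List Int)
      (st : PySem.Dict String (List String) × PySem.Dict String (List String)),
      pvA_loop all_lines is st
        = ((pvEdgesA all_lines is).foldl
             (fun d e => d.modify (pvCharStr e.1) [] (fun l => l ++ [pvCharStr e.2])) st.1,
           (pvEdgesA all_lines is).foldl
             (fun d e => d.modify (pvCharStr e.2) [] (fun l => l ++ [pvCharStr e.1])) st.2) := by
  intro is
  induction is with
  | nil => intro st; rfl
  | cons i rest ih =>
    intro st
    simp only [pvA_loop, pvEdgesA]
    cases PySem.List.pyGet? all_lines i with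
    | none => rfl
    | some w1 =>
      cases PySem.List.pyGet? all_lines (i + 1) with
      | none => rfl
      | some w2 =>
        dsimp only
        have hlen : PySem.Str.len w1 > PySem.Str.len w2 ↔ w2.toList.length < w1.toList.length := by
          simp [pysem]
        cases hfd : pvFirstDiff (List.zip w1.toList w2.toList) with
        | some ab =>
          obtain ⟨a, b⟩ := ab
          have hguard : ¬ (PySem.Str.len w1 > PySem.Str.len w2 ∧
              PySem.Str.slice w1 none (some (PySem.Str.len w2)) = w2) := by
            rintro ⟨h1, h2⟩
            rw [pv_guard_iff w1 w2 (hlen.mp h1)] at h2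
            simp [hfd] at h2
          rw [if_neg hguard, pv_inner_eq, hfd, ih]
          simp [List.foldl_cons]
        | none =>
          by_cases hl : PySem.Str.len w1 > PySem.Str.len w2
          · have h2 : PySem.Str.slice w1 none (some (PySem.Str.len w2)) = w2 :=
              (pv_guard_iff w1 w2 (hlen.mp hl)).mpr hfd
            rw [if_pos ⟨hl, h2⟩, if_pos hl]
            simp
          · have hguard : ¬ (PySem.Str.len w1 > PySem.Str.len w2 ∧
                PySem.Str.slice w1 none (some (PySem.Str.len w2)) = w2) := fun h => hl h.1
            rw [if_neg hguard, pv_inner_eq, hfd, if_neg hl, ih]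

theorem pvFirstDiff_mem {ps : List (Char × Char)} {e : Char × Char}
    (h : pvFirstDiff ps = some e) : e ∈ ps := by
  induction ps with
  | nil => simp [pvFirstDiff] at h
  | cons p rest ih =>
    obtain ⟨a, b⟩ := p
    simp only [pvFirstDiff] at h
    by_cases hab : a = b
    · subst hab; simp only [ne_eq, not_true_eq_false, if_false] at h
      exact List.mem_cons_of_mem _ (ih h)
    · simp only [ne_eq, hab, not_false_iff, if_true, Option.some.injEq] at h
      exact h ▸ List.mem_cons_self

-- under Pre_, every edge character of the applied stream is listed in `characters`
theorem pvEdges_chars_mem (all_lines : List String) (n : Int) (characters : List String)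
    (hc : ∀ s ∈ all_lines.take n.toNat, ∀ c ∈ s.toList, pvCharStr c ∈ characters) :
    ∀ is : List Int, (∀ i ∈ is, 0 ≤ i ∧ i + 1 < n) →
      ∀ e ∈ pvEdgesA all_lines is,
        pvCharStr e.1 ∈ characters ∧ pvCharStr e.2 ∈ characters := by
  intro is
  induction is with
  | nil => intro _ e he; simp [pvEdgesA] at he
  | cons i rest ih =>
    intro hbound e he
    obtain ⟨hi0, hin⟩ := hbound i List.mem_cons_self
    have hrest := ih (fun j hj => hbound j (List.mem_cons_of_mem _ hj))
    cases hg1 : PySem.List.pyGet? all_lines i with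
    | none => simp [pvEdgesA, hg1] at he
    | some w1 =>
      cases hg2 : PySem.List.pyGet? all_lines (i + 1) with
      | none => simp [pvEdgesA, hg1, hg2] at he
      | some w2 =>
        simp only [pvEdgesA, hg1, hg2] at he
        have htake : ∀ (j : Int) (w : String), 0 ≤ j → j < n →
            PySem.List.pyGet? all_lines j = some w → w ∈ all_lines.take n.toNat := by
          intro j w hj0 hjn hg
          rw [PySem.List.pyGet?_of_nonneg _ hj0] at hg
          have hjn' : j.toNat < n.toNat := by omega
          exact List.mem_of_getElem? ((List.getElem?_take_of_lt hjn').trans hg)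
        have hw1 : w1 ∈ all_lines.take n.toNat := htake i w1 hi0 (by omega) hg1
        have hw2 : w2 ∈ all_lines.take n.toNat := htake (i + 1) w2 (by omega) hin hg2
        cases hfd : pvFirstDiff (List.zip w1.toList w2.toList) with
        | some e' =>
          simp only [hfd, List.mem_cons] at he
          cases he with
          | inl h =>
            subst h
            have hz := pvFirstDiff_mem hfd
            have h1 : e.1 ∈ w1.toList := (List.of_mem_zip hz).1
            have h2 : e.2 ∈ w2.toList := (List.of_mem_zip hz).2
            exact ⟨hc w1 hw1 _ h1, hc w2 hw2 _ h2⟩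
          | inr h => exact hrest e h
        | none =>
          simp only [hfd] at he
          by_cases hl : PySem.Str.len w1 > PySem.Str.len w2
          · rw [if_pos hl] at he; simp at he
          · rw [if_neg hl] at he; exact hrest e he

-- the initial dicts map every key to []
theorem pv_getD_init (l : List String) (d : PySem.Dict String (List String)) (c : String)
    (h : d.getD c [] = []) :
    (l.foldl (fun d ch => d.insert ch ([] : List String)) d).getD c [] = [] := by
  induction l generalizing d with
  | nil => exact h
  | cons x l ih =>
    simp only [List.foldl_cons]
    apply ih
    rw [PySem.Dict.getD_insert]
    split_ifs <;> simp [h]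

-- value lookup in B's grouping fold: the last insert for c wins, and it is g c
theorem pv_getD_bucket (l : List String) (g : String → List String)
    (d : PySem.Dict String (List String)) (c : String) :
    (l.foldl (fun d x => d.insert x (g x)) d).getD c []
      = if c ∈ l then g c else d.getD c [] := by
  induction l generalizing d with
  | nil => simp
  | cons x l ih =>
    simp only [List.foldl_cons, ih, List.mem_cons]
    by_cases hl : c ∈ l
    · simp [hl]
    · rw [if_neg hl, PySem.Dict.getD_insert]
      by_cases hx : c = x <;> simp [hx, hl]

-- one side of the final equality: applying the edge stream to the initialised dict
-- yields, item for item, the grouped-comprehension dict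
theorem pv_side (characters : List String) (edges : List (Char × Char))
    (key val : Char × Char → Char)
    (hmem : ∀ e ∈ edges, pvCharStr (key e) ∈ characters) :
    (edges.foldl (fun d e => d.modify (pvCharStr (key e)) [] (fun l => l ++ [pvCharStr (val e)]))
        (characters.foldl (fun d ch => d.insert ch ([] : List String)) PySem.Dict.empty)).items
    = (characters.foldl (fun d c =>
        d.insert c ((edges.foldl (fun d e =>
          d.modify (pvCharStr (key e)) [] (fun l => l ++ [pvCharStr (val e)]))
            PySem.Dict.empty).getD c [])) PySem.Dict.empty).items := by
  have hbucket : ∀ (d0 : PySem.Dict String (List String)) (c : String), d0.getD c [] = [] →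
      (edges.foldl (fun d e =>
          d.modify (pvCharStr (key e)) [] (fun l => l ++ [pvCharStr (val e)])) d0).getD c []
        = (edges.filter (fun e => pvCharStr (key e) == c)).map (fun e => pvCharStr (val e)) := by
    intro d0 c h0
    have h := PySem.Dict.getD_foldl_modify_append
      (l := edges.map (fun e => (pvCharStr (key e), pvCharStr (val e)))) (d := d0) (c := c)
    rw [List.foldl_map] at h
    rw [h, h0]
    simp [List.filter_map, List.map_map, Function.comp_def]
  have hkeysInit :
      (characters.foldl (fun d ch => d.insert ch ([] : List String)) PySem.Dict.empty).keys
        = PySem.Set.ofList characters := by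
    rw [PySem.Dict.keys_foldl_insert]
    exact PySem.Set.update_nil_left characters
  have hndInit :
      (characters.foldl (fun d ch => d.insert ch ([] : List String)) PySem.Dict.empty).keys.Nodup := by
    rw [hkeysInit]; exact PySem.Set.nodup_ofList characters
  have hkeysA :
      (edges.foldl (fun d e => d.modify (pvCharStr (key e)) [] (fun l => l ++ [pvCharStr (val e)]))
          (characters.foldl (fun d ch => d.insert ch ([] : List String)) PySem.Dict.empty)).keys
        = PySem.Set.ofList characters := by
    rw [PySem.Dict.keys_foldl_modify_key, hkeysInit, PySem.Set.update_eq_append_filter]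
    have hnil : (PySem.Set.ofList (edges.map (fun e => pvCharStr (key e)))).filter
        (fun y => !(PySem.Set.contains (PySem.Set.ofList characters) y)) = [] := by
      apply List.filter_eq_nil_iff.mpr
      intro y hy
      obtain ⟨e, he, rfl⟩ := List.mem_map.mp ((PySem.Set.mem_ofList _ _).mp hy)
      have := hmem e he
      simp [PySem.Set.mem_ofList, this]
    rw [hnil, List.append_nil]
  have hkeysB :
      (characters.foldl (fun d c =>
          d.insert c ((edges.foldl (fun d e =>
            d.modify (pvCharStr (key e)) [] (fun l => l ++ [pvCharStr (val e)]))
              PySem.Dict.empty).getD c [])) PySem.Dict.empty).keys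
        = PySem.Set.ofList characters := by
    rw [PySem.Dict.keys_foldl_insert]
    exact PySem.Set.update_nil_left characters
  rw [PySem.Dict.items_eq_map_keys _ (by rw [hkeysA]; exact PySem.Set.nodup_ofList characters) ([] : List String),
      PySem.Dict.items_eq_map_keys _ (by rw [hkeysB]; exact PySem.Set.nodup_ofList characters) ([] : List String),
      hkeysA, hkeysB]
  apply List.map_congr_left
  intro c hcmem
  have hcchar : c ∈ characters := (PySem.Set.mem_ofList _ _).mp hcmem
  have hA := hbucket
    (characters.foldl (fun d ch => d.insert ch ([] : List String)) PySem.Dict.empty) c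
    (pv_getD_init characters PySem.Dict.empty c (by simp))
  have hB : (characters.foldl (fun d c =>
        d.insert c ((edges.foldl (fun d e =>
          d.modify (pvCharStr (key e)) [] (fun l => l ++ [pvCharStr (val e)]))
            PySem.Dict.empty).getD c [])) PySem.Dict.empty).getD c []
      = (edges.filter (fun e => pvCharStr (key e) == c)).map (fun e => pvCharStr (val e)) := by
    rw [pv_getD_bucket characters _ PySem.Dict.empty c, if_pos hcchar,
        hbucket PySem.Dict.empty c (by simp)]
  rw [hA, hB]

-- ===== VERDICT (by name: the statement is the Claim_ definition above) =====
theorem create_graph_outedges_spec : Claim_equal_create_graph_outedges := by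
  intro all_lines n characters prefix_ _ hpre
  obtain ⟨hn, hc⟩ := hpre
  unfold Spec_create_graph_outedges create_graph_outedges create_graph_outedges_alt
  simp only [pvA_loop_eq_edges, pvB_trunc_results_eq]
  have hbound : ∀ i ∈ PySem.List.pyRange 0 (n - 1), 0 ≤ i ∧ i + 1 < n := by
    intro i hi
    have := PySem.List.mem_pyRange_one.mp hi
    omega
  have hmem := pvEdges_chars_mem all_lines n characters hc
    (PySem.List.pyRange 0 (n - 1)) hbound
  exact Prod.ext
    (pv_side characters _ Prod.fst Prod.snd (fun e he => (hmem e he).1))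
    (pv_side characters _ Prod.snd Prod.fst (fun e he => (hmem e he).2))
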